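-- pv_equiv track=rewrite | github.com/rafaelportomoura/aws_cli | lambda/complexity/get-and-update-function-blocking-stage/main.py | returnVariables
-- ===== SOURCE A (Python) =====
-- def returnVariables(_key,_value,_variables):
--   _variable_command = ''
--   _finded = bool(0)
--   for _loop_key in _variables:
--     if _loop_key==_key:
--       _variables[_loop_key]=_value
--       _finded = bool(1)
--
--     _variable_command += f'{_loop_key}={_variables[_loop_key]},'
--
--   if not _finded:
--     _variable_command += f'{_key}={_value},'
--
--   return _variable_command[:len(_variable_command)-1]
-- ===== SOURCE B (Python) =====
-- def returnVariables(_key, _value, _variables):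
--     merged = {**_variables, _key: _value}
--     return ','.join(map('='.join, merged.items()))
-- ===== Notes on version B (the rewrite author's own statement) =====
-- stated objective: idiomatic
-- what changed: A's fused loop that searches for the key while concatenating a comma-terminated string (then slices off the trailing comma) is replaced by a single dict merge {**_variables, _key: _value} -- whose overwrite-in-place / append-new semantics subsumes A's found-flag and conditional append -- followed by one ','.join over the merged items; B does not mutate the argument dict (A overwrites the value in place when the key is present).
import Mathlib
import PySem

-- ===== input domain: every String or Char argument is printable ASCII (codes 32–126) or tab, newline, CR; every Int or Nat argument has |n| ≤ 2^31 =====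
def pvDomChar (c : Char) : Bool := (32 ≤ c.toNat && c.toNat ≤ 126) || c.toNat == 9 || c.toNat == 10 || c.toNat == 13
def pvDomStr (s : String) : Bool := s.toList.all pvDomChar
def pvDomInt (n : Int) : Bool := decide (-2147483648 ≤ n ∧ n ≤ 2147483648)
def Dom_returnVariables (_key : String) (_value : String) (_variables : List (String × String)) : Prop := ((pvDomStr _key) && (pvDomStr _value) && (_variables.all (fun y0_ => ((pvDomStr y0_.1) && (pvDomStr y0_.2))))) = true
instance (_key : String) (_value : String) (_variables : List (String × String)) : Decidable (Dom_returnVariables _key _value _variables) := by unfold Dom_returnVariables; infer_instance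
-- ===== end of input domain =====

-- B replaces A's fused find-and-build loop (found flag, string concatenation, trailing-comma
-- slice) by one dict merge {**_variables, _key: _value} followed by a single ','.join over the
-- merged items; objective: idiomatic. A mutates the argument dict when the key is present, B
-- never mutates it: the equivalence proved here is about the RETURN value only.

-- ===== PORT A =====
-- A's loop threads (command string, found flag, the dict being mutated) through the keys.
-- The dict lookup `_variables[_loop_key]` never raises (the key is iterated from the dict),
-- so `getD _ ""` is exact here.
def returnVariables (_key : String) (_value : String) (_variables : List (String × String)) : String :=
  let d0 : PySem.Dict String String := PySem.Dict.mk _variables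
  let st := d0.keys.foldl
    (fun (st : String × Bool × PySem.Dict String String) k =>
      let fd : Bool × PySem.Dict String String :=
        if k == _key then (true, st.2.2.insert k _value) else (st.2.1, st.2.2)
      (st.1 ++ k ++ "=" ++ fd.2.getD k "" ++ ",", fd.1, fd.2))
    ("", false, d0)
  let cmd := if st.2.1 = false then st.1 ++ _key ++ "=" ++ _value ++ "," else st.1
  PySem.Str.slice cmd none (some ((PySem.Str.len cmd : Int) - 1))

-- ===== PORT B =====
-- `{**_variables, _key: _value}` is the dict copied then `insert`ed (overwrite keeps the
-- position, a new key appends); `'='.join` on a (String, String) item joins its two fields.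
def returnVariables_alt (_key : String) (_value : String) (_variables : List (String × String)) : String :=
  let merged := (PySem.Dict.mk _variables).insert _key _value
  PySem.Str.join "," (merged.items.map (fun kv => PySem.Str.join "=" [kv.1, kv.2]))

-- ===== PRECONDITION & SPEC =====
-- Pre_ requires the association list to have distinct keys: it represents a Python dict,
-- which cannot hold duplicate keys, so a duplicate-keyed list corresponds to no Python input.
def Pre_returnVariables (_key : String) (_value : String) (_variables : List (String × String)) : Prop :=
  (_variables.map Prod.fst).Nodup
instance (_key : String) (_value : String) (_variables : List (String × String)) : Decidable (Pre_returnVariables _key _value _variables) := by unfold Pre_returnVariables; infer_instance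

def pvWitness_returnVariables : String × String × (List (String × String)) :=
  ("k", "v", [("a", "1"), ("b", "2")])

def Spec_returnVariables (_key : String) (_value : String) (_variables : List (String × String)) (out : String) : Prop := out = returnVariables_alt _key _value _variables
instance (_key : String) (_value : String) (_variables : List (String × String)) (out : String) : Decidable (Spec_returnVariables _key _value _variables out) := by unfold Spec_returnVariables; infer_instance

-- ===== CLAIM (what is proved, stated in full; the proofs are below) =====
def Claim_equal_returnVariables : Prop := ∀ (_key : String) (_value : String) (_variables : List (String × String)), Dom_returnVariables _key _value _variables → Pre_returnVariables _key _value _variables → Spec_returnVariables _key _value _variables (returnVariables _key _value _variables)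

-- ===== LEMMAS AND PROOFS =====

-- dropping the trailing ',' of comma-terminated chunks is ','-joining the chunks
theorem pv_dropLast_flatten_comma (ps : List (List Char)) (h : ps ≠ []) :
    ((ps.map (· ++ [','])).flatten).dropLast = PySem.Chars.join [','] ps := by
  induction ps with
  | nil => exact absurd rfl h
  | cons a t ih =>
    cases t with
    | nil => simp [PySem.Chars.join_singleton]
    | cons b t' =>
      have hne : ((List.map (· ++ [',']) (b :: t')).flatten) ≠ [] := by
        simp
      rw [List.map_cons, List.flatten_cons, List.dropLast_append_of_ne_nil hne,
        PySem.Chars.join_cons_cons, ih (by simp)]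

-- invariant of A's loop: the threaded dict is d0 updated iff the flag is set, the flag
-- records whether the key was seen, and the command is the flat list of comma chunks
theorem pv_foldA (key value : String) (d0 : PySem.Dict String String)
    (l : List String) (cmd : String) (b : Bool) :
    (l.foldl
      (fun (st : String × Bool × PySem.Dict String String) k =>
        let fd : Bool × PySem.Dict String String :=
          if k == key then (true, st.2.2.insert k value) else (st.2.1, st.2.2)
        (st.1 ++ k ++ "=" ++ fd.2.getD k "" ++ ",", fd.1, fd.2))
      (cmd, b, if b then d0.insert key value else d0)) =
    (String.ofList (cmd.toList ++
        (l.map (fun k => k.toList ++ '=' ::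
          (if k == key then value else d0.getD k "").toList ++ [','])).flatten),
      (b || l.any (· == key)),
      if (b || l.any (· == key)) then d0.insert key value else d0) := by
  induction l generalizing cmd b with
  | nil => simp
  | cons k t ih =>
    simp only [List.foldl_cons, List.map_cons, List.flatten_cons, List.any_cons]
    by_cases hk : k = key
    · subst hk
      have hins : (if b then d0.insert k value else d0).insert k value = d0.insert k value := by
        cases b <;> simp [PySem.Dict.insert_insert_self]
      simp only [beq_self_eq_true, ite_true, hins, PySem.Dict.getD_insert_self]
      have h2 := ih (cmd ++ k ++ "=" ++ value ++ ",") true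
      simp only [ite_true] at h2
      rw [h2]
      simp
    · have hbeq : (k == key) = false := by simp [hk]
      have hget : (if b then d0.insert key value else d0).getD k "" = d0.getD k "" := by
        cases b <;> simp [PySem.Dict.getD_insert_of_ne d0 value "" hk]
      simp only [hbeq, Bool.false_eq_true, ite_false, hget]
      rw [ih _ b]
      simp

-- the loop's flag is dict membership of the key
theorem pv_any_eq_contains (key : String) (d0 : PySem.Dict String String) :
    d0.keys.any (· == key) = d0.contains key := by
  rcases h : d0.contains key with _ | _
  · simp only [List.any_eq_false]
    intro k hkmem
    have : key ∉ d0.keys := by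
      intro hmem
      rw [← PySem.Dict.contains_iff_mem_keys _ _] at hmem
      simp [h] at hmem
    simp only [beq_iff_eq]
    intro hkk; exact this (hkk ▸ hkmem)
  · rw [List.any_eq_true]
    refine ⟨key, ?_, by simp⟩
    exact (PySem.Dict.contains_iff_mem_keys _ _).mp h

theorem pv_slice_drop (s : String) (ps : List (List Char)) (h : ps ≠ [])
    (hs : s.toList = (ps.map (· ++ [','])).flatten) :
    (PySem.Str.slice s none (some ((PySem.Str.len s : Int) - 1))).toList
      = PySem.Chars.join [','] ps := by
  have h1 : 1 ≤ s.toList.length := by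
    rcases hps : ps with _ | ⟨a, t⟩
    · exact absurd hps h
    · rw [hs, hps]; simp; omega
  have h1' : 1 ≤ s.length := by simpa using h1
  rw [show ((PySem.Str.len s : Int) - 1) = ((s.toList.length - 1 : Nat) : Int) by simp; omega]
  simp only [PySem.Str.toList_slice, PySem.Chars.slice_eq_listSlice]
  rw [PySem.List.slice_to_natCast, ← List.dropLast_eq_take, hs,
    pv_dropLast_flatten_comma ps h]

-- '='.join of a two-string item, at the List Char level
theorem pv_join_eq_pair (a b : List Char) :
    PySem.Chars.join ['='] [a, b] = a ++ '=' :: b := by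
  simp [PySem.Chars.join_cons_cons, PySem.Chars.join_singleton]

theorem returnVariables_eq_alt (key value : String) (vars : List (String × String))
    (hnd : (vars.map Prod.fst).Nodup) :
    returnVariables key value vars = returnVariables_alt key value vars := by
  simp only [returnVariables, returnVariables_alt]
  set d0 : PySem.Dict String String := PySem.Dict.mk vars with hd0
  have hnd0 : d0.keys.Nodup := by
    simpa [hd0, PySem.Dict.keys] using hnd
  have hfold := pv_foldA key value d0 d0.keys "" false
  simp only [Bool.false_or, Bool.false_eq_true, ite_false] at hfold
  rw [hfold]
  simp only [pv_any_eq_contains key d0]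
  apply String.toList_inj.mp
  rw [PySem.Str.toList_join]
  rcases hc : d0.contains key with _ | _
  · -- key absent: A appends the final chunk; B's insert appends (key, value) to the items
    have hkeys : ∀ k ∈ d0.keys, (k == key) = false := by
      intro k hk
      simp only [beq_eq_false_iff_ne, ne_eq]
      intro hkk
      subst hkk
      rw [← PySem.Dict.contains_iff_mem_keys _ _] at hk
      simp [hc] at hk
    have hitems : (d0.insert key value).items = d0.items ++ [(key, value)] := by
      rw [PySem.Dict.items_insert]; simp [hc]
    have hitems0 : d0.items = d0.keys.map (fun k => (k, d0.getD k "")) :=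
      PySem.Dict.items_eq_map_keys d0 hnd0 ""
    have hchunk : d0.keys.map (fun k => k.toList ++ '=' ::
          (if k == key then value else d0.getD k "").toList ++ [','])
        = (d0.keys.map (fun k => k.toList ++ '=' :: (d0.getD k "").toList)).map (· ++ [',']) := by
      rw [List.map_map]
      apply List.map_congr_left
      intro k hk
      simp [hkeys k hk]
    simp only [ite_true]
    rw [pv_slice_drop _
        ((d0.keys.map (fun k => k.toList ++ '=' :: (d0.getD k "").toList))
          ++ [key.toList ++ '=' :: value.toList])
        (by simp)
        (by rw [hchunk]; simp)]
    rw [hitems, hitems0]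
    congr 1
    simp only [List.map_append, List.map_map, List.map_cons, List.map_nil]
    congr 1
    · apply List.map_congr_left
      intro k _
      simp [pv_join_eq_pair]
    · simp [pv_join_eq_pair]
  · -- key present: the loop overwrote the value in place; merged keys = d0.keys
    have hmem : key ∈ d0.keys := (PySem.Dict.contains_iff_mem_keys _ _).mp hc
    have hkeysins : (d0.insert key value).keys = d0.keys :=
      PySem.Dict.keys_insert_of_contains d0 value hc
    have hndins : (d0.insert key value).keys.Nodup := hkeysins ▸ hnd0
    have hitems : (d0.insert key value).items
        = (d0.insert key value).keys.map (fun k => (k, (d0.insert key value).getD k "")) :=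
      PySem.Dict.items_eq_map_keys _ hndins ""
    have hchunk : d0.keys.map (fun k => k.toList ++ '=' ::
          (if k == key then value else d0.getD k "").toList ++ [','])
        = ((d0.insert key value).keys.map
            (fun k => k.toList ++ '=' :: ((d0.insert key value).getD k "").toList)).map (· ++ [',']) := by
      rw [hkeysins, List.map_map]
      apply List.map_congr_left
      intro k hk
      by_cases hkk : k = key
      · subst hkk
        simp [PySem.Dict.getD_insert_self]
      · simp [hkk, PySem.Dict.getD_insert_of_ne d0 value "" hkk]
    simp only [Bool.true_eq_false, ite_false]
    rw [pv_slice_drop _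
        ((d0.insert key value).keys.map
          (fun k => k.toList ++ '=' :: ((d0.insert key value).getD k "").toList))
        (by rw [hkeysins]; simp only [ne_eq, List.map_eq_nil_iff]
            intro h; rw [h] at hmem; simp at hmem)
        (by rw [hchunk]; simp)]
    rw [hitems]
    congr 1
    simp only [List.map_map]
    apply List.map_congr_left
    intro k _
    simp [pv_join_eq_pair]

-- ===== VERDICT (by name: the statement is the Claim_ definition above) =====
theorem returnVariables_spec : Claim_equal_returnVariables := by
  intro _key _value _variables _ hpre
  exact returnVariables_eq_alt _key _value _variables hpre
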